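-- pv_equiv track=rewrite | github.com/RushabhShahPrograms/30DaysOfCode | Day 30/Till the end &.py | solve
-- ===== SOURCE A (Python) =====
-- def solve(nums):
--     large = nums[0]
--     maxi = 0
--     for i in range(1, len(nums)):
--         large -= 1
--         maxi = max(large + nums[i], maxi)
--         large = max(large, nums[i])
--     return maxi
-- ===== SOURCE B (Python) =====
-- def solve(nums):
--     # Two-pass decomposition: nums[j] + nums[i] - (i - j) = (nums[j] + j) + (nums[i] - i) for j < i.
--     n = len(nums)
--     pref = [nums[0]]  # pref[t] = max over j <= t of nums[j] + j
--     for j in range(1, n):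
--         pref.append(max(pref[j - 1], nums[j] + j))
--     maxi = 0
--     for i in range(1, n):
--         maxi = max(maxi, nums[i] - i + pref[i - 1])
--     return maxi
-- ===== Notes on version B (the rewrite author's own statement) =====
-- stated objective: alternative
-- what changed: Replaces A's single scan with a decaying scalar running max by a two-pass structure: first materialize a prefix-max table of nums[j]+j, then combine it with nums[i]-i in a second pass, using the identity nums[j]+nums[i]-(i-j) = (nums[j]+j)+(nums[i]-i).
import Mathlib
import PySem

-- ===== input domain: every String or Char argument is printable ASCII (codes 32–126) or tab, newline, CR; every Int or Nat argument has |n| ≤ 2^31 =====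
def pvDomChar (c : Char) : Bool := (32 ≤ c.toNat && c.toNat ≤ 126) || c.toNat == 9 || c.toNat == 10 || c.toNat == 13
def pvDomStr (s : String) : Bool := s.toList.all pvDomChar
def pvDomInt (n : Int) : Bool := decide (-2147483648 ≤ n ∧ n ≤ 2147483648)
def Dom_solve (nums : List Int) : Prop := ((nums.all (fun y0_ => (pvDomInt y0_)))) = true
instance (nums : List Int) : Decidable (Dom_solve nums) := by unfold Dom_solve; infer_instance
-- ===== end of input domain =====

-- B replaces A's decaying-scalar single scan by a two-pass prefix-max-table decomposition
-- (identity nums[j]+nums[i]-(i-j) = (nums[j]+j)+(nums[i]-i)); same cost, different structure.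

-- ===== PORT A =====
def solve (nums : List Int) : Int :=
  (((PySem.List.pyRange 1 (nums.length : Int) 1).foldl
      (fun (s : Int × Int) i =>
        let large := s.1 - 1
        let maxi := max (large + PySem.List.pyGetD nums i 0) s.2
        (max large (PySem.List.pyGetD nums i 0), maxi))
      (PySem.List.pyGetD nums 0 0, 0))).2

-- ===== PORT B =====
def solve_alt (nums : List Int) : Int :=
  let pref := (PySem.List.pyRange 1 (nums.length : Int) 1).foldl
    (fun (pref : List Int) j =>
      pref ++ [max (PySem.List.pyGetD pref (j - 1) 0) (PySem.List.pyGetD nums j 0 + j)])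
    [PySem.List.pyGetD nums 0 0]
  (PySem.List.pyRange 1 (nums.length : Int) 1).foldl
    (fun maxi i => max maxi (PySem.List.pyGetD nums i 0 - i + PySem.List.pyGetD pref (i - 1) 0))
    0

-- ===== PRECONDITION & SPEC =====
-- Pre_ excludes only the empty list, on which both Pythons raise IndexError (nums[0]).
def Pre_solve (nums : List Int) : Prop := nums ≠ []
instance (nums : List Int) : Decidable (Pre_solve nums) := by unfold Pre_solve; infer_instance
def pvWitness_solve : List Int := ([3, -1, 4])

def Spec_solve (nums : List Int) (out : Int) : Prop := out = solve_alt nums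
instance (nums : List Int) (out : Int) : Decidable (Spec_solve nums out) := by unfold Spec_solve; infer_instance

-- ===== CLAIM (what is proved, stated in full; the proofs are below) =====
def Claim_equal_solve : Prop := ∀ (nums : List Int), Dom_solve nums → Pre_solve nums → Spec_solve nums (solve nums)

-- ===== LEMMAS AND PROOFS =====

-- running max of nums[j] + j over j ≤ k
def mRun (nums : List Int) : Nat → Int
  | 0 => PySem.List.pyGetD nums 0 0
  | k + 1 => max (mRun nums k) (PySem.List.pyGetD nums ((k : Int) + 1) 0 + ((k : Int) + 1))

-- B's first loop builds exactly the table of running maxima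
theorem pref_build (nums : List Int) (k : Nat) :
    (PySem.List.pyRange 1 ((k : Int) + 1) 1).foldl
      (fun (pref : List Int) j =>
        pref ++ [max (PySem.List.pyGetD pref (j - 1) 0) (PySem.List.pyGetD nums j 0 + j)])
      [PySem.List.pyGetD nums 0 0]
    = (List.range (k + 1)).map (mRun nums) := by
  induction k with
  | zero =>
      simp [PySem.List.pyRange_one_eq_nil, List.range_succ, mRun]
  | succ k ih =>
      have h : (1 : Int) ≤ (k : Int) + 1 := by omega
      push_cast
      rw [PySem.List.pyRange_one_succ_right h, List.foldl_append, ih]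
      simp only [List.foldl_cons, List.foldl_nil, add_sub_cancel_right]
      have hget : PySem.List.pyGetD ((List.range (k + 1)).map (mRun nums)) ((k : Nat) : Int) 0
          = mRun nums k := by
        rw [PySem.List.pyGetD_natCast]
        simp [List.getD_eq_getElem?_getD]
      rw [hget]
      conv_rhs => rw [List.range_succ]
      rw [List.map_append]
      rfl

-- the two second-pass folds agree: A's decayed scalar equals the table entry shifted by the index
theorem main_fold (nums : List Int) (nlen : Nat) (cnt : Nat) :
    ∀ (s : Nat) (M : Int), 1 ≤ s → s + cnt ≤ nlen + 1 →
    ((PySem.List.pyRange (s : Int) ((s : Int) + (cnt : Int)) 1).foldl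
        (fun (st : Int × Int) i =>
          (max (st.1 - 1) (PySem.List.pyGetD nums i 0),
           max (st.1 - 1 + PySem.List.pyGetD nums i 0) st.2))
        (mRun nums (s - 1) - ((s - 1 : Nat) : Int), M)).2
    = (PySem.List.pyRange (s : Int) ((s : Int) + (cnt : Int)) 1).foldl
        (fun maxi i => max maxi (PySem.List.pyGetD nums i 0 - i +
          PySem.List.pyGetD ((List.range nlen).map (mRun nums)) (i - 1) 0))
        M := by
  induction cnt with
  | zero =>
      intro s M hs hle
      simp [PySem.List.pyRange_one_eq_nil]
  | succ cnt ih =>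
      intro s M hs hle
      have hcons : PySem.List.pyRange (s : Int) ((s : Int) + ((cnt : Int) + 1)) 1
          = (s : Int) :: PySem.List.pyRange ((s : Int) + 1) ((s : Int) + ((cnt : Int) + 1)) 1 :=
        PySem.List.pyRange_one_cons (by push_cast; omega)
      push_cast
      rw [hcons]
      simp only [List.foldl_cons]
      have hs1 : s - 1 + 1 = s := by omega
      have hsn : s - 1 < nlen := by omega
      -- B's table lookup at index s-1
      have hget : PySem.List.pyGetD ((List.range nlen).map (mRun nums)) ((s : Int) - 1) 0
          = mRun nums (s - 1) := by
        rw [show ((s : Int) - 1) = ((s - 1 : Nat) : Int) by omega, PySem.List.pyGetD_natCast]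
        simp [List.getD_eq_getElem?_getD, hsn]
      -- new accumulators coincide
      have hM : max (mRun nums (s - 1) - ((s - 1 : Nat) : Int) - 1 + PySem.List.pyGetD nums (s : Int) 0) M
          = max M (PySem.List.pyGetD nums (s : Int) 0 - (s : Int) +
              PySem.List.pyGetD ((List.range nlen).map (mRun nums)) ((s : Int) - 1) 0) := by
        rw [hget, max_comm]
        congr 1
        have hc : ((s - 1 : Nat) : Int) = (s : Int) - 1 := by omega
        rw [hc]; ring
      have hL : max (mRun nums (s - 1) - ((s - 1 : Nat) : Int) - 1) (PySem.List.pyGetD nums (s : Int) 0)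
          = mRun nums ((s + 1) - 1) - (((s + 1) - 1 : Nat) : Int) := by
        have h1 : ((s + 1) - 1 : Nat) = (s - 1) + 1 := by omega
        rw [h1]
        have h2 : (((s - 1) + 1 : Nat) : Int) = (s : Int) := by omega
        have h3 : ((s - 1 : Nat) : Int) + 1 = (s : Int) := by omega
        simp only [mRun, h2, h3]
        omega
      have ihs := ih (s + 1) (max M (PySem.List.pyGetD nums (s : Int) 0 - (s : Int) +
          PySem.List.pyGetD ((List.range nlen).map (mRun nums)) ((s : Int) - 1) 0))
        (by omega) (by omega)
      push_cast at ihs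
      rw [hM, hL]
      have harg : (s : Int) + 1 + (cnt : Int) = (s : Int) + ((cnt : Int) + 1) := by ring
      rw [harg] at ihs
      exact ihs

-- ===== VERDICT (by name: the statement is the Claim_ definition above) =====
theorem solve_spec : Claim_equal_solve := by
  intro nums _ hpre
  unfold Spec_solve solve solve_alt
  have hn : 1 ≤ nums.length := List.length_pos_of_ne_nil hpre
  have hk : nums.length = (nums.length - 1) + 1 := by omega
  have hpref := pref_build nums (nums.length - 1)
  have hcast : ((nums.length - 1 : Nat) : Int) + 1 = (nums.length : Int) := by omega
  rw [hcast] at hpref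
  rw [hk] at hpref ⊢
  simp only [hpref]
  have hmain := main_fold nums ((nums.length - 1) + 1) (nums.length - 1) 1 0 (by omega) (by omega)
  have hone : ((1 : Nat) : Int) = (1 : Int) := by norm_num
  rw [hone] at hmain
  have harg : (1 : Int) + ((nums.length - 1 : Nat) : Int) = (((nums.length - 1) + 1 : Nat) : Int) := by
    push_cast; ring
  rw [harg] at hmain
  have hinit : mRun nums (1 - 1) - ((1 - 1 : Nat) : Int) = PySem.List.pyGetD nums 0 0 := by
    simp [mRun]
  rw [hinit] at hmain
  exact hmain
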